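-- pv_equiv track=rewrite | github.com/LizbethOrtizLopez/Interfaz-de-M-todos-Num-ricos | Proyecto_Final/Interpolacion_Newton/interpolacion_newton_code.py | POLINOMIO
-- ===== SOURCE A (Python) =====
-- import copy
--
-- class PolinomioClass:
--
--     def __init__(self,coeficientes=[0]):
--         self.coef = coeficientes
--         self.grado = len(coeficientes) - 1
--
--     def getGrado(self):
--         return self.grado
--
--     def getCoeficientes(self):
--         return self.coef
--
--     def getCoeficiente(self,idx):
--         return self.coef[idx]
--
--     def multiplicaConstante(self,constante):
--         #warning: modificando campo fuera de constructor o set.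
--         return PolinomioClass([x * constante for x in self.coef])
--
--     def aumentaCoeficiente(self,final):
--         if final:
--             self.coef.append(0)
--         else:
--             self.coef.insert(0,0)
--         self.grado = self.grado + 1
--
--     def sumaPolinomio(self,pol2):
--         arr=[]
--         for i in range (self.getGrado()+1):
--             arr.append(self.coef[i]+pol2.coef[i])
--         return PolinomioClass(arr);
--
--     def multiplicaLineal(self,pol_lineal):
--         nuevo_grado = self.getGrado() + 1
--         factor = pol_lineal.getCoeficiente(0)
--         op1 = self.multiplicaConstante(factor)
--         op1.aumentaCoeficiente(True)
--         factor = pol_lineal.getCoeficiente(1)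
--         op2 = self.multiplicaConstante(factor)
--         op2.aumentaCoeficiente(False)
--         suma = op1.sumaPolinomio(op2)
--         self.coef = suma.getCoeficientes()
--         self.grado = nuevo_grado
--         return self
--
-- def GET_LINEAL(n):
--     return PolinomioClass([1,-n])
--
-- def GET_POLINOMIO(arr):
--     for i in range (1,len(arr)):
--         arr[0] = arr[0].multiplicaLineal(arr[i])
--     return arr[0]
--
-- def POLINOMIO(points,b):
--     n = len(points)
--     lins = []
--     obj1 = PolinomioClass(points)
--     for i in range(n):
--         lins.append(0)
--     for i in range (n-1):
--         lins[i] = GET_LINEAL(points[i][0])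
--     pol = []
--     for i in range(n):
--         pol.append(0)
--     pol[0] = b[0]
--     for i in range(1,n):
--         x = b[i]
--         listlin = []
--         for j in range(i):
--             listlin.append(copy.copy(lins[j]))
--         p = GET_POLINOMIO(listlin)
--         p = p.multiplicaConstante(x)
--         m = p.getGrado()+1
--         for j in range(m):
--             pol[j] = pol[j] + p.getCoeficiente(i-j)
--     return pol
-- ===== SOURCE B (Python) =====
-- def POLINOMIO(points, b):
--     n = len(points)
--     pol = [b[0]] + [0] * (n - 1)
--     prod = [1]
--     for i in range(1, n):
--         c = points[i - 1][0]
--         prod = [u - c * v for u, v in zip([0] + prod, prod + [0])]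
--         x = b[i]
--         for k in range(i + 1):
--             pol[k] = pol[k] + x * prod[k]
--     return pol
-- ===== Notes on version B (the rewrite author's own statement) =====
-- stated objective: faster
-- what changed: B keeps one running product of the linear factors in ascending-coefficient order and multiplies in a single new factor (t - x_{i-1}) per step, instead of A's rebuilding the whole factor product from scratch (via polynomial objects and copies) at every outer iteration.
import Mathlib
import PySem

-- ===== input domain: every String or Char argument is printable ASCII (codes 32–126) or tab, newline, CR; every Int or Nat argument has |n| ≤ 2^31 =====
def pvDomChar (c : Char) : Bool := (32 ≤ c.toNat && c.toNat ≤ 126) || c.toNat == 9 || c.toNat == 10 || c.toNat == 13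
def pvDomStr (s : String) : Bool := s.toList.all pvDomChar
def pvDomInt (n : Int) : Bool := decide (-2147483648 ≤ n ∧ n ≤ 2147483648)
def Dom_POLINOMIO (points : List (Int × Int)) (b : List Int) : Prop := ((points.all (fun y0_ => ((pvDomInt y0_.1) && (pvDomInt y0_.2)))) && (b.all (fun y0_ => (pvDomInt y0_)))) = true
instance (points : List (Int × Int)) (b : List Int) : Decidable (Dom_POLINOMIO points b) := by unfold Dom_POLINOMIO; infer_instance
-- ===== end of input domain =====

-- B maintains ONE running product of the linear factors (ascending coefficients), multiplying in one
-- new factor per outer step, instead of A's per-step rebuild of the whole product (objective: faster).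

-- ===== PORT A =====
-- Python class PolinomioClass: coef list + stored grado field
structure PolyA where
  coef : List Int
  grado : Int
deriving Repr, DecidableEq

def mkPolyA (c : List Int) : PolyA := ⟨c, (c.length : Int) - 1⟩

def PolyA.multiplicaConstante (p : PolyA) (k : Int) : PolyA :=
  mkPolyA (p.coef.map (fun x => x * k))

def PolyA.aumentaCoeficiente (p : PolyA) (final : Bool) : PolyA :=
  if final then ⟨p.coef ++ [0], p.grado + 1⟩ else ⟨0 :: p.coef, p.grado + 1⟩

def PolyA.sumaPolinomio (p p2 : PolyA) : PolyA :=
  mkPolyA ((List.range (p.grado + 1).toNat).foldl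
    (fun arr i => arr ++ [p.coef.getD i 0 + p2.coef.getD i 0]) [])

def PolyA.multiplicaLineal (p lin : PolyA) : PolyA :=
  let nuevo_grado := p.grado + 1
  let f1 := lin.coef.getD 0 0
  let op1 := (p.multiplicaConstante f1).aumentaCoeficiente true
  let f2 := lin.coef.getD 1 0
  let op2 := (p.multiplicaConstante f2).aumentaCoeficiente false
  let suma := op1.sumaPolinomio op2
  ⟨suma.coef, nuevo_grado⟩

def GET_LINEAL (n : Int) : PolyA := mkPolyA [1, -n]

def GET_POLINOMIO (arr : List PolyA) : PolyA :=
  ((List.range arr.length).drop 1).foldl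
    (fun acc t => acc.multiplicaLineal (arr.getD t (mkPolyA [0])))
    (arr.headD (mkPolyA [0]))

-- Python's `lins` holds int-0 placeholders overwritten for i < n-1 and never read at n-1;
-- ported as Option PolyA with none for the placeholder.
def linsA (points : List (Int × Int)) : List (Option PolyA) :=
  (List.range (points.length - 1)).foldl
    (fun l i => l.set i (some (GET_LINEAL (points.getD i (0, 0)).1)))
    (List.replicate points.length none)

-- the body of A's outer `for i in range(1, n)` loop (copy.copy is identity under value semantics)
def bodyA (points : List (Int × Int)) (b : List Int) (pol : List Int) (i : Nat) : List Int :=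
  let x := b.getD i 0
  let listlin := (List.range i).map (fun j => ((linsA points).getD j none).getD (mkPolyA [0]))
  let p := GET_POLINOMIO listlin
  let p := p.multiplicaConstante x
  let m := (p.grado + 1).toNat
  (List.range m).foldl (fun pol j => pol.set j (pol.getD j 0 + p.coef.getD (i - j) 0)) pol

-- `obj1 = PolinomioClass(points)` in A is dead code and is not ported
def POLINOMIO (points : List (Int × Int)) (b : List Int) : List Int :=
  (List.range' 1 (points.length - 1)).foldl (bodyA points b)
    ((List.replicate points.length (0 : Int)).set 0 (b.getD 0 0))

-- ===== PORT B =====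
-- state = (pol, prod); prod is the ascending-coefficient product of the processed linear factors
def bodyB (points : List (Int × Int)) (b : List Int) (st : List Int × List Int) (i : Nat) :
    List Int × List Int :=
  let pol := st.1
  let prod0 := st.2
  let c := (points.getD (i - 1) (0, 0)).1
  let prod := List.zipWith (fun u v => u - c * v) (0 :: prod0) (prod0 ++ [0])
  let x := b.getD i 0
  ((List.range (i + 1)).foldl (fun pol k => pol.set k (pol.getD k 0 + x * prod.getD k 0)) pol,
   prod)

def POLINOMIO_alt (points : List (Int × Int)) (b : List Int) : List Int :=
  ((List.range' 1 (points.length - 1)).foldl (bodyB points b)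
    (b.getD 0 0 :: List.replicate (points.length - 1) (0 : Int), [1])).1

-- ===== PRECONDITION & SPEC =====
-- Pre_ excludes exactly the inputs where Python A raises IndexError: n = 0 (pol[0] = b[0] on empty
-- lists) and len(b) < n (b[i] out of range in the outer loop).
def Pre_POLINOMIO (points : List (Int × Int)) (b : List Int) : Prop :=
  points ≠ [] ∧ points.length ≤ b.length

instance (points : List (Int × Int)) (b : List Int) : Decidable (Pre_POLINOMIO points b) := by
  unfold Pre_POLINOMIO; infer_instance

def pvWitness_POLINOMIO : (List (Int × Int)) × List Int := ([(1, 2), (3, 4), (5, 6)], [7, 8, 9])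

def Spec_POLINOMIO (points : List (Int × Int)) (b : List Int) (out : List Int) : Prop := out = POLINOMIO_alt points b
instance (points : List (Int × Int)) (b : List Int) (out : List Int) : Decidable (Spec_POLINOMIO points b out) := by unfold Spec_POLINOMIO; infer_instance

-- ===== CLAIM (what is proved, stated in full; the proofs are below) =====
def Claim_equal_POLINOMIO : Prop := ∀ (points : List (Int × Int)) (b : List Int), Dom_POLINOMIO points b → Pre_POLINOMIO points b → Spec_POLINOMIO points b (POLINOMIO points b)

-- ===== LEMMAS AND PROOFS =====

-- x-coordinate of the j-th point (total, via getD)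
def xF (points : List (Int × Int)) (j : Nat) : Int := (points.getD j (0, 0)).1

-- one multiplication of an ascending-coefficient polynomial by (t - c), exactly B's zipWith step
def stepAsc (q : List Int) (c : Int) : List Int :=
  List.zipWith (fun u v => u - c * v) (0 :: q) (q ++ [0])

-- ascending-coefficient product of the first i linear factors
def prodAsc (points : List (Int × Int)) (i : Nat) : List Int :=
  (List.range i).foldl (fun q j => stepAsc q (xF points j)) [1]

lemma length_stepAsc (q : List Int) (c : Int) : (stepAsc q c).length = q.length + 1 := by
  simp [stepAsc]

lemma prodAsc_succ (points : List (Int × Int)) (i : Nat) :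
    prodAsc points (i + 1) = stepAsc (prodAsc points i) (xF points i) := by
  simp [prodAsc, List.range_succ]

lemma length_prodAsc (points : List (Int × Int)) (i : Nat) :
    (prodAsc points i).length = i + 1 := by
  induction i with
  | zero => simp [prodAsc]
  | succ k ih => rw [prodAsc_succ, length_stepAsc, ih]

lemma map_range_getD_add (l1 l2 : List Int) (h : l1.length = l2.length) :
    (List.range l1.length).map (fun i => l1.getD i 0 + l2.getD i 0) = List.zipWith (· + ·) l1 l2 := by
  induction l1 generalizing l2 with
  | nil =>
    cases l2 with
    | nil => simp
    | cons b t2 => simp at h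
  | cons a t ih =>
    cases l2 with
    | nil => simp at h
    | cons b t2 =>
      rw [List.length_cons, List.range_succ_eq_map, List.map_cons, List.map_map]
      simp only [List.getD_cons_zero, List.zipWith_cons_cons]
      congr 1
      exact ih t2 (by simpa using h)

lemma zip_identity (r : List Int) (c b0 : Int) :
    List.zipWith (· + ·) (r.map (fun x => x * 1) ++ [0]) (b0 * (-c) :: r.map (fun x => x * (-c)))
      = List.zipWith (fun u v => u - c * v) (r ++ [0]) (b0 :: r) := by
  induction r generalizing b0 with
  | nil => simp; ring
  | cons a t ih =>
    simp only [List.map_cons, List.cons_append, List.zipWith_cons_cons]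
    rw [ih a]
    congr 1
    ring

lemma zipWith_reverse_eq (f : Int → Int → Int) :
    ∀ (l1 l2 : List Int), l1.length = l2.length →
      (List.zipWith f l1 l2).reverse = List.zipWith f l1.reverse l2.reverse := by
  intro l1
  induction l1 with
  | nil => intro l2 h; cases l2 with
    | nil => simp
    | cons b t2 => simp at h
  | cons a t1 ih =>
    intro l2 h
    cases l2 with
    | nil => simp at h
    | cons b t2 =>
      simp only [List.zipWith_cons_cons, List.reverse_cons]
      rw [List.zipWith_append (by simpa using h), ih t2 (by simpa using h)]
      simp

-- the heart of A's multiplicaLineal, in terms of the ascending step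
lemma step_lemma (q : List Int) (c : Int) :
    PolyA.multiplicaLineal ⟨q.reverse, (q.length : Int) - 1⟩ (GET_LINEAL c)
      = ⟨(stepAsc q c).reverse, (q.length : Int)⟩ := by
  have hop1 : ((q.length : Int) - 1 + 1 + 1).toNat = q.length + 1 := by omega
  simp only [PolyA.multiplicaLineal, GET_LINEAL, mkPolyA, PolyA.multiplicaConstante,
    PolyA.aumentaCoeficiente, PolyA.sumaPolinomio, List.getD_cons_zero, List.getD_cons_succ,
    reduceIte, Bool.false_eq_true, if_false, List.length_map, List.length_reverse]
  rw [hop1, PySem.List.foldl_append_singleton_eq_map, List.nil_append]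
  have hlen : (q.reverse.map (fun x => x * 1) ++ [(0 : Int)]).length = q.length + 1 := by simp
  rw [show (List.range (q.length + 1)) = List.range (q.reverse.map (fun x => x * 1) ++ [(0:Int)]).length by rw [hlen]]
  rw [map_range_getD_add _ _ (by simp)]
  rw [show ((0 : Int) :: q.reverse.map (fun x => x * (-c))) = ((0 * (-c) : Int) :: q.reverse.map (fun x => x * (-c))) by ring_nf]
  rw [zip_identity]
  simp only [PolyA.mk.injEq]
  refine ⟨?_, by omega⟩
  rw [stepAsc, zipWith_reverse_eq _ _ _ (by simp)]
  simp

-- A's product-of-linear-factors helper built once per outer step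
def linArr (points : List (Int × Int)) (i : Nat) : List PolyA :=
  (List.range i).map (fun j => GET_LINEAL (xF points j))

lemma getD_linArr (points : List (Int × Int)) (i t : Nat) (h : t < i) :
    (linArr points i).getD t (mkPolyA [0]) = GET_LINEAL (xF points t) := by
  simp [linArr, h]

lemma getPol_eq (points : List (Int × Int)) (m : Nat) :
    GET_POLINOMIO (linArr points (m + 1))
      = ⟨(prodAsc points (m + 1)).reverse, ((m + 1 : Nat) : Int)⟩ := by
  induction m with
  | zero =>
    have h1 : linArr points 1 = [GET_LINEAL (xF points 0)] := by simp [linArr]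
    have h2 : GET_POLINOMIO [GET_LINEAL (xF points 0)] = GET_LINEAL (xF points 0) := rfl
    have h3 : prodAsc points 1 = [0 - xF points 0 * 1, 1 - xF points 0 * 0] := rfl
    rw [h1, h2, h3]
    simp only [GET_LINEAL, mkPolyA, PolyA.mk.injEq, List.reverse_cons, List.reverse_nil,
      List.nil_append, List.singleton_append, List.cons.injEq, List.length_cons, List.length_nil]
    norm_num
  | succ k ih =>
    -- unfold GET_POLINOMIO on both sizes to folds over ranges
    have harr : ∀ i : Nat, (linArr points i).length = i := by intro i; simp [linArr]
    have hfold : ∀ j : Nat, GET_POLINOMIO (linArr points (j + 1))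
        = (List.range' 1 j).foldl
            (fun acc t => acc.multiplicaLineal ((linArr points (j + 1)).getD t (mkPolyA [0])))
            (GET_LINEAL (xF points 0)) := by
      intro j
      have hdrop : (List.range (j + 1)).drop 1 = List.range' 1 j := by
        rw [List.range_eq_range', List.range'_succ]
        simp
      have hhead : (linArr points (j + 1)).headD (mkPolyA [0]) = GET_LINEAL (xF points 0) := by
        simp [linArr, List.range_succ_eq_map]
      simp only [GET_POLINOMIO, harr, hdrop, hhead]
    rw [hfold (k + 1)]
    have hstep : (List.range' 1 (k + 1)) = List.range' 1 k ++ [k + 1] := by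
      have h1 : 1 + 1 * k = k + 1 := by omega
      rw [List.range'_concat, h1]
    rw [hstep, List.foldl_append]
    have hpref : (List.range' 1 k).foldl
        (fun acc t => acc.multiplicaLineal ((linArr points (k + 1 + 1)).getD t (mkPolyA [0])))
        (GET_LINEAL (xF points 0))
        = (List.range' 1 k).foldl
        (fun acc t => acc.multiplicaLineal ((linArr points (k + 1)).getD t (mkPolyA [0])))
        (GET_LINEAL (xF points 0)) := by
      apply PySem.List.foldl_congr_mem
      intro acc t ht
      have ht' : t < k + 1 := by
        have := List.mem_range'.mp ht; omega
      rw [getD_linArr _ _ _ (by omega), getD_linArr _ _ _ ht']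
    rw [hpref, ← hfold k, ih]
    simp only [List.foldl_cons, List.foldl_nil]
    rw [getD_linArr _ _ _ (by omega)]
    have hg : ((k + 1 : Nat) : Int) = ((prodAsc points (k + 1)).length : Int) - 1 := by
      rw [length_prodAsc]; push_cast; ring
    rw [hg, step_lemma, ← prodAsc_succ, length_prodAsc]

-- the pointwise value A adds equals x * (ascending coefficient)
lemma coef_getD_rev (L : List Int) (x : Int) (i j : Nat) (hL : L.length = i + 1) (hj : j < i + 1) :
    (L.reverse.map (fun v => v * x)).getD (i - j) 0 = x * L.getD j 0 := by
  have h1 : i - j < L.length := by omega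
  have h2 : j < L.length := by omega
  rw [List.getD_eq_getElem?_getD, List.getElem?_map, List.getElem?_reverse h1]
  have : L.length - 1 - (i - j) = j := by omega
  rw [this, List.getElem?_eq_getElem h2, List.getD_eq_getElem?_getD, List.getElem?_eq_getElem h2]
  simp [mul_comm]

-- one outer iteration of A equals one inner update of B
lemma bodyA_eq (points : List (Int × Int)) (b : List Int) (pol : List Int) (i : Nat)
    (h1 : 1 ≤ i) (h2 : i < points.length) :
    bodyA points b pol i
      = (List.range (i + 1)).foldl
          (fun pol k => pol.set k (pol.getD k 0 + b.getD i 0 * (prodAsc points i).getD k 0)) pol := by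
  have hlins : ∀ j, j < points.length - 1 →
      (linsA points).getD j none = some (GET_LINEAL (xF points j)) := by
    intro j hj
    have key : ∀ k : Nat, k ≤ points.length →
        (List.range k).foldl (fun l i => l.set i (some (GET_LINEAL (points.getD i (0, 0)).1)))
          (List.replicate points.length none)
        = (List.range k).map (fun j => some (GET_LINEAL (xF points j)))
            ++ List.replicate (points.length - k) none := by
      intro k
      induction k with
      | zero => intro _; simp
      | succ t iht =>
        intro hk
        rw [List.range_succ, List.foldl_append, iht (by omega), List.foldl_cons, List.foldl_nil]
        have hlt : ¬ (t < ((List.range t).map (fun j => some (GET_LINEAL (xF points j)))).length) := by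
          simp
        rw [List.set_append]
        simp only [List.length_map, List.length_range, if_neg (by omega : ¬ t < t), Nat.sub_self]
        obtain ⟨u, hu⟩ : ∃ u, points.length - t = u + 1 := ⟨points.length - t - 1, by omega⟩
        have hu2 : u = points.length - (t + 1) := by omega
        rw [hu, hu2, List.replicate_succ, List.set_cons_zero]
        simp [xF]
    rw [linsA, key (points.length - 1) (by omega)]
    rw [List.getD_append _ _ _ _ (by simp [hj])]
    simp [hj]
  -- listlin = linArr points i
  have hll : (List.range i).map (fun j => ((linsA points).getD j none).getD (mkPolyA [0]))
      = linArr points i := by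
    apply List.map_congr_left
    intro t ht
    have ht' : t < i := List.mem_range.mp ht
    rw [hlins t (by omega)]
    rfl
  obtain ⟨m, rfl⟩ : ∃ m, i = m + 1 := ⟨i - 1, by omega⟩
  show bodyA points b pol (m + 1) = _
  simp only [bodyA]
  rw [hll, getPol_eq]
  simp only [PolyA.multiplicaConstante, mkPolyA, List.length_map, List.length_reverse,
    length_prodAsc]
  have hm : (((m + 1 + 1 : Nat) : Int) - 1 + 1).toNat = m + 1 + 1 := by omega
  rw [hm]
  apply PySem.List.foldl_congr_mem
  intro acc j hjmem
  have hj : j < m + 1 + 1 := List.mem_range.mp hjmem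
  rw [coef_getD_rev _ _ _ _ (length_prodAsc points (m + 1)) hj]

-- B's state invariant through the outer loop
lemma outer_eq (points : List (Int × Int)) (b : List Int) :
    ∀ (k s : Nat), 1 ≤ s → s + k ≤ points.length → ∀ pol : List Int,
      (List.range' s k).foldl (bodyA points b) pol
        = ((List.range' s k).foldl (bodyB points b) (pol, prodAsc points (s - 1))).1 := by
  intro k
  induction k with
  | zero => intro s _ _ pol; simp
  | succ t ih =>
    intro s hs hsk pol
    rw [List.range'_succ, List.foldl_cons, List.foldl_cons]
    have hstep : bodyB points b (pol, prodAsc points (s - 1)) s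
        = ((List.range (s + 1)).foldl
            (fun pol k => pol.set k (pol.getD k 0 + b.getD s 0 * (prodAsc points s).getD k 0)) pol,
           prodAsc points s) := by
      have hs1 : s - 1 + 1 = s := by omega
      have hprod : List.zipWith (fun u v => u - (points.getD (s - 1) (0, 0)).1 * v)
          ((0 : Int) :: prodAsc points (s - 1)) (prodAsc points (s - 1) ++ [0])
          = prodAsc points s := by
        rw [show prodAsc points s = prodAsc points (s - 1 + 1) by rw [hs1], prodAsc_succ]
        rfl
      simp only [bodyB, hprod]
    rw [hstep, bodyA_eq points b pol s hs (by omega)]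
    have := ih (s + 1) (by omega) (by omega)
    simpa using this ((List.range (s + 1)).foldl
      (fun pol k => pol.set k (pol.getD k 0 + b.getD s 0 * (prodAsc points s).getD k 0)) pol)

-- ===== VERDICT (by name: the statement is the Claim_ definition above) =====
theorem POLINOMIO_spec : Claim_equal_POLINOMIO := by
  unfold Claim_equal_POLINOMIO
  intro points b _ hpre
  obtain ⟨hne, _⟩ := hpre
  unfold Spec_POLINOMIO POLINOMIO POLINOMIO_alt
  obtain ⟨m, hm⟩ : ∃ m, points.length = m + 1 :=
    ⟨points.length - 1, by cases points <;> simp_all⟩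
  have hpol0 : (List.replicate points.length (0 : Int)).set 0 (b.getD 0 0)
      = b.getD 0 0 :: List.replicate (points.length - 1) (0 : Int) := by
    rw [hm, List.replicate_succ, List.set_cons_zero]
    simp
  rw [hpol0]
  have hprod0 : prodAsc points 0 = [1] := by simp [prodAsc]
  have := outer_eq points b (points.length - 1) 1 (by omega) (by omega)
    (b.getD 0 0 :: List.replicate (points.length - 1) (0 : Int))
  rw [this]
  simp [hprod0]
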